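-- pv_equiv track=rewrite | github.com/djeada/Nauka-Programowania | src/Python/24_Listy_trudne/Zad3.py | min_iloczyn_v2
-- ===== SOURCE A (Python) =====
-- def min_iloczyn_v2(lista):
--
--     n = len(lista)
--
--     if n <= 2:
--         raise ValueError("Listy musza byc rownej dlugosci.")
--
--     maks_lewo, maks_prawo, min_lewo, min_prawo = [0] * n, [0] * n, [0] * n, [0] * n
--
--     minimum = float("inf")
--     maksimum = float("-inf")
--
--     for i in range(n):
--         min_lewo[i] = minimum
--         maks_lewo[i] = maksimum
--
--         minimum = min(minimum, lista[i])
--         maksimum = max(maksimum, lista[i])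
--
--     minimum = float("inf")
--     maksimum = float("-inf")
--
--     for i in reversed(range(n)):
--         min_prawo[i] = minimum
--         maks_prawo[i] = maksimum
--
--         minimum = min(minimum, lista[i])
--         maksimum = max(maksimum, lista[i])
--
--     wynik = float("inf")
--
--     for i in range(n - 2):
--         wynik = min(
--             wynik,
--             min(
--                 lista[i + 1] * min_lewo[i + 1] * min_prawo[i + 1],
--                 lista[i + 1] * min_lewo[i + 1] * maks_prawo[i + 1],
--                 lista[i + 1] * maks_lewo[i + 1] * min_prawo[i + 1],
--                 lista[i + 1] * maks_lewo[i + 1] * maks_prawo[i + 1],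
--             ),
--         )
--
--     return wynik
-- ===== SOURCE B (Python) =====
-- def min_iloczyn_v2(lista):
--     n = len(lista)
--     if n <= 2:
--         raise ValueError("Listy musza byc rownej dlugosci.")
--     s = sorted(lista)
--     return min(s[0] * s[1] * s[2], s[0] * s[-1] * s[-2])
-- ===== Notes on version B (the rewrite author's own statement) =====
-- stated objective: simpler
-- what changed: Replaces the four prefix/suffix min/max arrays and three index loops by one sort and a two-candidate closed form: the minimum triple product is either the product of the three smallest elements or the smallest element times the two largest.
import Mathlib
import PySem

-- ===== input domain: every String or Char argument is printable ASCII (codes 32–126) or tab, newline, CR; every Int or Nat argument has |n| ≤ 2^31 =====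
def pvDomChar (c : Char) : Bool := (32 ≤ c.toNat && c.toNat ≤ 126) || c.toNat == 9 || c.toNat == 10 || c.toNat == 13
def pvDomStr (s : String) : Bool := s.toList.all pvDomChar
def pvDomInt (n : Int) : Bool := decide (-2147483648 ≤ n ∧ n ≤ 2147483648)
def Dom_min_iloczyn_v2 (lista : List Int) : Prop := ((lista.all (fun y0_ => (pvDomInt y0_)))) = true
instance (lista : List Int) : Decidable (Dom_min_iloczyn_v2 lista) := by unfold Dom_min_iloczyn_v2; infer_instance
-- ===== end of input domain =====

-- B replaces A's three passes and four prefix/suffix min/max arrays by one sort and a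
-- two-candidate closed form (objective: simpler; intended also faster via the
-- C-implemented sort, as claimed in claim.json).

-- ===== PORT A =====
-- Python's running minimum/maksimum start at float('inf')/float('-inf'); they are
-- represented as Option Int (none = infinity not yet replaced by any element), which is
-- exact because only finite (some) entries are ever read when n ≥ 3 (inside Pre_).
def pyMinInf (m : Option Int) (x : Int) : Option Int :=
  some (match m with | none => x | some v => min v x)
def pyMaxInf (m : Option Int) (x : Int) : Option Int :=
  some (match m with | none => x | some v => max v x)

-- first loop of A (forward over the list): builds (min_lewo, maks_lewo); the state
-- (mn, mx) is the running (minimum, maksimum), written BEFORE being updated.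
def loopLeft (mn mx : Option Int) : List Int → List (Option Int) × List (Option Int)
  | [] => ([], [])
  | x :: xs =>
      let rest := loopLeft (pyMinInf mn x) (pyMaxInf mx x) xs
      (mn :: rest.1, mx :: rest.2)

-- second loop of A (over reversed(range(n))): returns
-- (minimum, maksimum, min_prawo, maks_prawo); entry i holds the state before index i.
def loopRight : List Int → Option Int × Option Int × List (Option Int) × List (Option Int)
  | [] => (none, none, [], [])
  | x :: xs =>
      let r := loopRight xs
      (pyMinInf r.1 x, pyMaxInf r.2.1 x, r.1 :: r.2.2.1, r.2.1 :: r.2.2.2)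

-- array read min_lewo[i] etc.: exact for the indices 1..n-2 actually read (entry is some)
def getOptD (xs : List (Option Int)) (i : Int) : Int :=
  (PySem.List.pyGetD xs i none).getD 0

def min_iloczyn_v2 (lista : List Int) : Int :=
  let n : Int := lista.length
  if n ≤ 2 then 0  -- Python raises ValueError here; excluded by Pre_
  else
    let L := loopLeft none none lista
    let R := loopRight lista
    let minLewo := L.1
    let maksLewo := L.2
    let minPrawo := R.2.2.1
    let maksPrawo := R.2.2.2
    let wynik : Option Int :=
      (PySem.List.pyRange 0 (n - 2) 1).foldl (fun w i =>
        let a := PySem.List.pyGetD lista (i + 1) 0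
        pyMinInf w
          (min (min (min (a * getOptD minLewo (i + 1) * getOptD minPrawo (i + 1))
                         (a * getOptD minLewo (i + 1) * getOptD maksPrawo (i + 1)))
                    (a * getOptD maksLewo (i + 1) * getOptD minPrawo (i + 1)))
               (a * getOptD maksLewo (i + 1) * getOptD maksPrawo (i + 1)))) none
    wynik.getD 0  -- exact: n ≥ 3, so the loop ran at least once and wynik is some

-- ===== PORT B =====
def min_iloczyn_v2_alt (lista : List Int) : Int :=
  let n : Int := lista.length
  if n ≤ 2 then 0  -- Python raises ValueError here; excluded by Pre_
  else
    let s := PySem.List.sorted lista (fun x => x) false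
    min (PySem.List.pyGetD s 0 0 * PySem.List.pyGetD s 1 0 * PySem.List.pyGetD s 2 0)
        (PySem.List.pyGetD s 0 0 * PySem.List.pyGetD s (-1) 0 * PySem.List.pyGetD s (-2) 0)

-- ===== PRECONDITION & SPEC =====
-- A raises ValueError when len(lista) <= 2; exactly those inputs are excluded.
def Pre_min_iloczyn_v2 (lista : List Int) : Prop := 3 ≤ lista.length
instance (lista : List Int) : Decidable (Pre_min_iloczyn_v2 lista) := by
  unfold Pre_min_iloczyn_v2; infer_instance
def pvWitness_min_iloczyn_v2 : List Int := [3, -1, 4, -2]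
def Spec_min_iloczyn_v2 (lista : List Int) (out : Int) : Prop := out = min_iloczyn_v2_alt lista
instance (lista : List Int) (out : Int) : Decidable (Spec_min_iloczyn_v2 lista out) := by
  unfold Spec_min_iloczyn_v2; infer_instance

-- ===== CLAIM (what is proved, stated in full; the proofs are below) =====
def Claim_equal_min_iloczyn_v2 : Prop := ∀ (lista : List Int), Dom_min_iloczyn_v2 lista → Pre_min_iloczyn_v2 lista → Spec_min_iloczyn_v2 lista (min_iloczyn_v2 lista)

-- ===== LEMMAS AND PROOFS =====

-- ===== helper definitions for the proofs =====

-- `v` is the product of three elements of `l` taken at strictly increasing positions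
def TripS (l : List Int) (v : Int) : Prop :=
  ∃ t : List Int, t.Sublist l ∧ t.length = 3 ∧ t.prod = v

-- the A-side candidate at middle position j (1 ≤ j ≤ n-2), as plain list extrema
def cand (l : List Int) (j : Nat) : Int :=
  let a := l.getD j 0
  let pm := ((l.take j).min?).getD 0
  let pM := ((l.take j).max?).getD 0
  let sm := ((l.drop (j + 1)).min?).getD 0
  let sM := ((l.drop (j + 1)).max?).getD 0
  min (min (min (a * pm * sm) (a * pm * sM)) (a * pM * sm)) (a * pM * sM)

def candList (l : List Int) : List Int :=
  (List.range (l.length - 2)).map (fun k => cand l (k + 1))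

-- ===== basic facts about TripS =====

theorem tripS_of_perm {l l' : List Int} (h : l.Perm l') {v : Int}
    (hv : TripS l v) : TripS l' v := by
  obtain ⟨t, hsub, hlen, hprod⟩ := hv
  have hsp : t.Subperm l' := (hsub.subperm).trans h.subperm
  obtain ⟨t', hperm, hsub'⟩ := hsp
  exact ⟨t', hsub', by rw [hperm.length_eq, hlen], by rw [hperm.prod_eq, hprod]⟩

theorem tripS_of_indices {l : List Int} {i j k : Nat}
    (hij : i < j) (hjk : j < k) (hk : k < l.length) :
    TripS l (l.getD i 0 * l.getD j 0 * l.getD k 0) := by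
  have hj : j < l.length := hjk.trans hk
  have hi : i < l.length := hij.trans hj
  refine ⟨[l[i], l[j], l[k]], ?_, by simp, ?_⟩
  · have pw : List.Pairwise (fun a b : Fin l.length => a < b) [⟨i, hi⟩, ⟨j, hj⟩, ⟨k, hk⟩] := by
      simp [List.pairwise_cons, Fin.mk_lt_mk]
      exact ⟨⟨hij, hij.trans hjk⟩, hjk⟩
    simpa using List.map_getElem_sublist pw
  · rw [List.getD_eq_getElem l 0 hi, List.getD_eq_getElem l 0 hj, List.getD_eq_getElem l 0 hk]
    simp [List.prod_cons]; ring

theorem tripS_indices {l : List Int} {v : Int} (h : TripS l v) :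
    ∃ i j k : Nat, i < j ∧ j < k ∧ k < l.length ∧
      v = l.getD i 0 * l.getD j 0 * l.getD k 0 := by
  obtain ⟨t, hsub, hlen, hprod⟩ := h
  obtain ⟨is, heq, hpw⟩ := List.sublist_eq_map_getElem hsub
  subst heq
  rcases is with _ | ⟨a, _ | ⟨b, _ | ⟨c, _ | ⟨e, is⟩⟩⟩⟩
  · simp at hlen
  · simp at hlen
  · simp at hlen
  case cons.cons.cons.cons => simp at hlen
  simp [List.pairwise_cons] at hpw
  simp [List.prod_cons] at hprod
  refine ⟨a.1, b.1, c.1, hpw.1.1, hpw.2, c.isLt, ?_⟩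
  rw [List.getD_eq_getElem l 0 a.isLt, List.getD_eq_getElem l 0 b.isLt,
      List.getD_eq_getElem l 0 c.isLt]
  rw [← hprod]; ring

-- ===== arithmetic lemmas =====

-- a linear function on an interval is bounded below by one of its endpoint values
theorem lin_min_le {a b x t : Int} (hax : a ≤ x) (hxb : x ≤ b) :
    min (a * t) (b * t) ≤ x * t := by
  rcases le_or_gt 0 t with ht | ht
  · exact le_trans (min_le_left _ _) (by nlinarith)
  · exact le_trans (min_le_right _ _) (by nlinarith)

-- the bilinear corner bound: the best of the four corner products is ≤ u * a * w
theorem corner_min_le {pm pM sm sM a u w : Int}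
    (h1 : pm ≤ u) (h2 : u ≤ pM) (h3 : sm ≤ w) (h4 : w ≤ sM) :
    min (min (min (a * pm * sm) (a * pm * sM)) (a * pM * sm)) (a * pM * sM)
      ≤ u * a * w := by
  set m4 := min (min (min (a * pm * sm) (a * pm * sM)) (a * pM * sm)) (a * pM * sM) with hm4
  have A1 : m4 ≤ a * pm * sm := le_trans (min_le_left _ _) (le_trans (min_le_left _ _) (min_le_left _ _))
  have A2 : m4 ≤ a * pm * sM := le_trans (min_le_left _ _) (le_trans (min_le_left _ _) (min_le_right _ _))
  have A3 : m4 ≤ a * pM * sm := le_trans (min_le_left _ _) (min_le_right _ _)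
  have A4 : m4 ≤ a * pM * sM := min_le_right _ _
  have B1 : m4 ≤ pm * (a * w) := by
    have := lin_min_le (t := pm * a) h3 h4
    calc m4 ≤ min (sm * (pm * a)) (sM * (pm * a)) :=
          le_min (A1.trans_eq (by ring)) (A2.trans_eq (by ring))
      _ ≤ w * (pm * a) := this
      _ = pm * (a * w) := by ring
  have B2 : m4 ≤ pM * (a * w) := by
    have := lin_min_le (t := pM * a) h3 h4
    calc m4 ≤ min (sm * (pM * a)) (sM * (pM * a)) :=
          le_min (A3.trans_eq (by ring)) (A4.trans_eq (by ring))
      _ ≤ w * (pM * a) := this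
      _ = pM * (a * w) := by ring
  calc m4 ≤ min (pm * (a * w)) (pM * (a * w)) := le_min B1 B2
    _ ≤ u * (a * w) := lin_min_le h1 h2
    _ = u * a * w := by ring

-- the central sign lemma about the sorted list's two corner products
theorem sign_lemma {a b c d e x y z : Int}
    (hab : a ≤ b) (hbc : b ≤ c) (hcd : c ≤ d) (hde : d ≤ e)
    (hax : a ≤ x) (hxy : x ≤ y) (hyz : y ≤ z)
    (hby : b ≤ y) (hyd : y ≤ d) (hcz : c ≤ z) (hze : z ≤ e) :
    min (a * b * c) (a * d * e) ≤ x * y * z := by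
  rcases le_or_gt 0 x with hx | hx
  · rcases le_or_gt 0 a with ha | ha
    · refine le_trans (min_le_left _ _) ?_
      have hb : 0 ≤ b := le_trans ha hab
      have hc : 0 ≤ c := le_trans hb hbc
      have h1 : a * b ≤ x * y := mul_le_mul hax hby hb hx
      exact mul_le_mul h1 hcz hc (mul_nonneg hx (le_trans hx hxy))
    · refine le_trans (min_le_right _ _) ?_
      have hy : 0 ≤ y := le_trans hx hxy
      have hd : 0 ≤ d := le_trans hy hyd
      have he : 0 ≤ e := le_trans hd hde
      have h1 : a * d * e ≤ 0 :=
        mul_nonpos_of_nonpos_of_nonneg (mul_nonpos_of_nonpos_of_nonneg ha.le hd) he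
      have h2 : 0 ≤ x * y * z := mul_nonneg (mul_nonneg hx hy) (le_trans hy hyz)
      linarith
  · have ha : a < 0 := lt_of_le_of_lt hax hx
    rcases le_or_gt 0 (y * z) with hyz0 | hyz0
    · have hstep : a * (y * z) ≤ x * (y * z) := mul_le_mul_of_nonneg_right hax hyz0
      rcases le_or_gt 0 y with hy | hy
      · refine le_trans (min_le_right _ _) ?_
        have hz : 0 ≤ z := le_trans hy hyz
        have hde' : y * z ≤ d * e := mul_le_mul hyd hze hz (le_trans hy hyd)
        have h1 : a * (d * e) ≤ a * (y * z) := mul_le_mul_of_nonpos_left hde' ha.le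
        nlinarith
      · rcases le_or_gt z 0 with hz | hz
        · refine le_trans (min_le_left _ _) ?_
          have hb : b < 0 := lt_of_le_of_lt hby hy
          have h1 : y * z ≤ b * z := mul_le_mul_of_nonpos_right hby hz
          have h2 : b * z ≤ b * c := mul_le_mul_of_nonpos_left hcz hb.le
          have h3 : a * (b * c) ≤ a * (y * z) := mul_le_mul_of_nonpos_left (le_trans h1 h2) ha.le
          nlinarith
        · nlinarith
    · have hy : y < 0 := by nlinarith
      have hz : 0 < z := by nlinarith
      have hpos : 0 < x * (y * z) := mul_pos_of_neg_of_neg hx (by nlinarith)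
      rcases le_or_gt 0 d with hd | hd
      · refine le_trans (min_le_right _ _) ?_
        have he : 0 ≤ e := le_trans hd hde
        have h1 : a * d * e ≤ 0 :=
          mul_nonpos_of_nonpos_of_nonneg (mul_nonpos_of_nonpos_of_nonneg ha.le hd) he
        nlinarith
      · refine le_trans (min_le_left _ _) ?_
        have hc : c < 0 := lt_of_le_of_lt hcd hd
        have hb : b < 0 := lt_of_le_of_lt hby hy
        have h1 : 0 < a * b := mul_pos_of_neg_of_neg ha hb
        nlinarith

-- ===== facts about the sorted list =====

theorem sorted_getD_mono {s : List Int} (hs : s.Pairwise (· ≤ ·))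
    {i j : Nat} (hij : i ≤ j) (hj : j < s.length) :
    s.getD i 0 ≤ s.getD j 0 := by
  rw [List.getD_eq_getElem s 0 (Nat.lt_of_le_of_lt hij hj), List.getD_eq_getElem s 0 hj]
  rcases Nat.lt_or_eq_of_le hij with h | h
  · exact List.pairwise_iff_getElem.mp hs i j _ hj h
  · subst h; exact le_refl _

-- every triple product of a sorted list is at least min(c1, c2)
theorem low_sorted {s : List Int} (hs : s.Pairwise (· ≤ ·)) (hn : 3 ≤ s.length)
    {v : Int} (hv : TripS s v) :
    min (s.getD 0 0 * s.getD 1 0 * s.getD 2 0)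
        (s.getD 0 0 * s.getD (s.length - 2) 0 * s.getD (s.length - 1) 0) ≤ v := by
  obtain ⟨p, q, r, hpq, hqr, hr, hveq⟩ := tripS_indices hv
  rcases Nat.lt_or_ge s.length 4 with h4 | h4
  · have hp : p = 0 := by omega
    have hq : q = 1 := by omega
    have hrr : r = 2 := by omega
    subst hp hq hrr
    rw [hveq]
    exact min_le_left _ _
  · rw [hveq]
    exact sign_lemma
      (sorted_getD_mono hs (by omega) (by omega))
      (sorted_getD_mono hs (by omega) (by omega))
      (sorted_getD_mono hs (by omega) (by omega))
      (sorted_getD_mono hs (by omega) (by omega))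
      (sorted_getD_mono hs (by omega) (by omega))
      (sorted_getD_mono hs hpq.le (by omega))
      (sorted_getD_mono hs hqr.le hr)
      (sorted_getD_mono hs (by omega) (by omega))
      (sorted_getD_mono hs (by omega) (by omega))
      (sorted_getD_mono hs (by omega) (by omega))
      (sorted_getD_mono hs (by omega) (by omega))

-- both closed-form candidates are triple products of the sorted list
theorem achieve_c1 {s : List Int} (hn : 3 ≤ s.length) :
    TripS s (s.getD 0 0 * s.getD 1 0 * s.getD 2 0) := by
  rcases s with _ | ⟨a, _ | ⟨b, _ | ⟨c, rest⟩⟩⟩ <;> simp at hn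
  exact ⟨[a, b, c], (((List.nil_sublist rest).cons₂ c).cons₂ b).cons₂ a, by simp,
    by simp [List.prod_cons]; ring⟩

theorem drop_pair {s : List Int} (hn : 3 ≤ s.length) :
    s.drop (s.length - 2) = [s.getD (s.length - 2) 0, s.getD (s.length - 1) 0] := by
  have h2 : s.length - 2 < s.length := by omega
  have h1 : s.length - 1 < s.length := by omega
  rw [List.drop_eq_getElem_cons h2]
  have e2 : s.length - 2 + 1 = s.length - 1 := by omega
  rw [e2, List.drop_eq_getElem_cons h1]
  have e1 : s.length - 1 + 1 = s.length := by omega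
  rw [e1, List.drop_length]
  rw [List.getD_eq_getElem s 0 h2, List.getD_eq_getElem s 0 h1]

theorem achieve_c2 {s : List Int} (hn : 3 ≤ s.length) :
    TripS s (s.getD 0 0 * s.getD (s.length - 2) 0 * s.getD (s.length - 1) 0) := by
  rcases s with _ | ⟨a, tail⟩
  · simp at hn
  · have hdrop := drop_pair (s := a :: tail) hn
    have hsub : (a :: ((a :: tail).drop ((a :: tail).length - 2))).Sublist (a :: tail) := by
      have hm : (a :: tail).length - 2 = (tail.length - 2) + 1 := by simp at hn ⊢; omega
      rw [hm, List.drop_succ_cons]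
      exact (List.drop_sublist _ _).cons₂ a
    refine ⟨a :: ((a :: tail).drop ((a :: tail).length - 2)), hsub, ?_, ?_⟩
    · rw [hdrop]; rfl
    · rw [hdrop]; simp [List.prod_cons]; ring

-- ===== characterisation of port A's loops =====

theorem foldl_pyMinInf_some (xs : List Int) (a : Int) :
    xs.foldl pyMinInf (some a) = some (xs.foldl min a) := by
  induction xs generalizing a with
  | nil => rfl
  | cons x xs ih => simp [pyMinInf, ih]

theorem foldl_pyMinInf_none (xs : List Int) :
    xs.foldl pyMinInf none = xs.min? := by
  cases xs with
  | nil => rfl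
  | cons x xs => simp [pyMinInf, foldl_pyMinInf_some, List.min?]

theorem foldl_pyMaxInf_some (xs : List Int) (a : Int) :
    xs.foldl pyMaxInf (some a) = some (xs.foldl max a) := by
  induction xs generalizing a with
  | nil => rfl
  | cons x xs ih => simp [pyMaxInf, ih]

theorem foldl_pyMaxInf_none (xs : List Int) :
    xs.foldl pyMaxInf none = xs.max? := by
  cases xs with
  | nil => rfl
  | cons x xs => simp [pyMaxInf, foldl_pyMaxInf_some, List.max?]

theorem loopLeft_spec (l : List Int) (mn mx : Option Int) :
    loopLeft mn mx l
      = ((List.range l.length).map (fun j => (l.take j).foldl pyMinInf mn),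
         (List.range l.length).map (fun j => (l.take j).foldl pyMaxInf mx)) := by
  induction l generalizing mn mx with
  | nil => rfl
  | cons x xs ih =>
      simp [loopLeft, ih, List.range_succ_eq_map, List.map_map, Function.comp_def]

theorem pyMinInf_min? (x : Int) (xs : List Int) :
    pyMinInf xs.min? x = (x :: xs).min? := by
  cases xs with
  | nil => rfl
  | cons y ys =>
      simp [pyMinInf, List.min?]
      rw [List.foldl_assoc]
      exact min_comm _ _

theorem pyMaxInf_max? (x : Int) (xs : List Int) :
    pyMaxInf xs.max? x = (x :: xs).max? := by
  cases xs with
  | nil => rfl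
  | cons y ys =>
      simp [pyMaxInf, List.max?]
      rw [List.foldl_assoc]
      exact max_comm _ _

theorem loopRight_spec (l : List Int) :
    loopRight l
      = (l.min?, l.max?,
         (List.range l.length).map (fun j => (l.drop (j + 1)).min?),
         (List.range l.length).map (fun j => (l.drop (j + 1)).max?)) := by
  induction l with
  | nil => rfl
  | cons x xs ih =>
      simp [loopRight, ih, pyMinInf_min?, pyMaxInf_max?,
        List.range_succ_eq_map, List.map_map, Function.comp_def]

-- port A computes the minimum of the candidate list
theorem pyGetD_nat_succ {α : Type} (xs : List α) (k : Nat) (d : α) :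
    PySem.List.pyGetD xs ((k : Int) + 1) d = xs.getD (k + 1) d := by
  rw [show ((k : Int) + 1) = (((k + 1 : Nat)) : Int) by push_cast; ring,
    PySem.List.pyGetD_natCast]

theorem getOptD_map_range {n k : Nat} (f : Nat → Option Int) (hk : k + 1 < n) :
    getOptD ((List.range n).map f) ((k : Int) + 1) = (f (k + 1)).getD 0 := by
  unfold getOptD
  rw [pyGetD_nat_succ]
  congr 1
  simp [List.getD, hk]

theorem portA_eq_candList (l : List Int) (h : 3 ≤ l.length) :
    min_iloczyn_v2 l = (candList l).min?.getD 0 := by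
  have hlen : ¬ ((l.length : Int) ≤ 2) := by omega
  unfold min_iloczyn_v2
  simp only [if_neg hlen, loopLeft_spec, loopRight_spec]
  have hm : ((l.length : Int) - 2) = ((l.length - 2 : Nat) : Int) := by omega
  rw [hm, PySem.List.pyRange_zero_natCast, List.foldl_map]
  rw [PySem.List.foldl_congr_mem _ _
      (fun (w : Option Int) (k : Nat) => pyMinInf w (cand l (k + 1))) _ ?_]
  · rw [← List.foldl_map, foldl_pyMinInf_none]
    rfl
  · intro acc k hk
    have hk' : k + 1 < l.length := by
      have := List.mem_range.mp hk; omega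
    congr 1
    rw [pyGetD_nat_succ, getOptD_map_range _ hk', getOptD_map_range _ hk',
        getOptD_map_range _ hk', getOptD_map_range _ hk']
    simp only [cand, foldl_pyMinInf_none, foldl_pyMaxInf_none]

-- ===== the main bridge =====

-- extrema of prefixes/suffixes: index extraction and bounds

theorem take_min?_index {l : List Int} {j : Nat} (hj1 : 1 ≤ j) (hjl : j < l.length) :
    ∃ i, i < j ∧ ((l.take j).min?).getD 0 = l.getD i 0 := by
  have hne : l.take j ≠ [] := by
    simp [← List.length_pos_iff]; omega
  cases hmin : (l.take j).min? with
  | none => exact absurd (List.min?_eq_none_iff.mp hmin) hne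
  | some m =>
      obtain ⟨i, hi, hval⟩ := List.mem_iff_getElem.mp (List.min?_mem hmin)
      have hi' : i < j := by have := hi; simp [List.length_take] at this; omega
      refine ⟨i, hi', ?_⟩
      rw [List.getD_eq_getElem l 0 (by omega), ← List.getElem_take (h := hi), hval]
      rfl

theorem take_max?_index {l : List Int} {j : Nat} (hj1 : 1 ≤ j) (hjl : j < l.length) :
    ∃ i, i < j ∧ ((l.take j).max?).getD 0 = l.getD i 0 := by
  have hne : l.take j ≠ [] := by
    simp [← List.length_pos_iff]; omega
  cases hmax : (l.take j).max? with
  | none => exact absurd (List.max?_eq_none_iff.mp hmax) hne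
  | some m =>
      obtain ⟨i, hi, hval⟩ := List.mem_iff_getElem.mp (List.max?_mem hmax)
      have hi' : i < j := by have := hi; simp [List.length_take] at this; omega
      refine ⟨i, hi', ?_⟩
      rw [List.getD_eq_getElem l 0 (by omega), ← List.getElem_take (h := hi), hval]
      rfl

theorem drop_min?_index {l : List Int} {j : Nat} (hj : j + 1 < l.length) :
    ∃ k, j < k ∧ k < l.length ∧ ((l.drop (j + 1)).min?).getD 0 = l.getD k 0 := by
  have hne : l.drop (j + 1) ≠ [] := by
    simp; omega
  cases hmin : (l.drop (j + 1)).min? with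
  | none => exact absurd (List.min?_eq_none_iff.mp hmin) hne
  | some m =>
      obtain ⟨i, hi, hval⟩ := List.mem_iff_getElem.mp (List.min?_mem hmin)
      have hi' : j + 1 + i < l.length := by
        have := hi; simp [List.length_drop] at this; omega
      refine ⟨j + 1 + i, by omega, hi', ?_⟩
      rw [List.getD_eq_getElem l 0 hi', ← List.getElem_drop (h := hi), hval]
      rfl

theorem drop_max?_index {l : List Int} {j : Nat} (hj : j + 1 < l.length) :
    ∃ k, j < k ∧ k < l.length ∧ ((l.drop (j + 1)).max?).getD 0 = l.getD k 0 := by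
  have hne : l.drop (j + 1) ≠ [] := by
    simp; omega
  cases hmax : (l.drop (j + 1)).max? with
  | none => exact absurd (List.max?_eq_none_iff.mp hmax) hne
  | some m =>
      obtain ⟨i, hi, hval⟩ := List.mem_iff_getElem.mp (List.max?_mem hmax)
      have hi' : j + 1 + i < l.length := by
        have := hi; simp [List.length_drop] at this; omega
      refine ⟨j + 1 + i, by omega, hi', ?_⟩
      rw [List.getD_eq_getElem l 0 hi', ← List.getElem_drop (h := hi), hval]
      rfl

theorem take_min?_le {l : List Int} {j i : Nat} (hij : i < j) (hjl : j < l.length) :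
    ((l.take j).min?).getD 0 ≤ l.getD i 0 := by
  have hmem : l.getD i 0 ∈ l.take j := by
    rw [List.getD_eq_getElem l 0 (by omega)]
    exact List.mem_iff_getElem.mpr ⟨i, by simp [List.length_take]; omega,
      List.getElem_take⟩
  cases hmin : (l.take j).min? with
  | none => exact absurd (List.min?_eq_none_iff.mp hmin ▸ hmem) (List.not_mem_nil)
  | some m => exact (List.min?_eq_some_iff.mp hmin).2 _ hmem

theorem take_max?_ge {l : List Int} {j i : Nat} (hij : i < j) (hjl : j < l.length) :
    l.getD i 0 ≤ ((l.take j).max?).getD 0 := by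
  have hmem : l.getD i 0 ∈ l.take j := by
    rw [List.getD_eq_getElem l 0 (by omega)]
    exact List.mem_iff_getElem.mpr ⟨i, by simp [List.length_take]; omega,
      List.getElem_take⟩
  cases hmax : (l.take j).max? with
  | none => exact absurd (List.max?_eq_none_iff.mp hmax ▸ hmem) (List.not_mem_nil)
  | some m => exact (List.max?_eq_some_iff.mp hmax).2 _ hmem

theorem drop_min?_le {l : List Int} {j k : Nat} (hjk : j < k) (hk : k < l.length) :
    ((l.drop (j + 1)).min?).getD 0 ≤ l.getD k 0 := by
  have hmem : l.getD k 0 ∈ l.drop (j + 1) := by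
    rw [List.getD_eq_getElem l 0 hk]
    exact List.mem_iff_getElem.mpr ⟨k - (j + 1), by simp [List.length_drop]; omega,
      by rw [List.getElem_drop]; congr 1; omega⟩
  cases hmin : (l.drop (j + 1)).min? with
  | none => exact absurd (List.min?_eq_none_iff.mp hmin ▸ hmem) (List.not_mem_nil)
  | some m => exact (List.min?_eq_some_iff.mp hmin).2 _ hmem

theorem drop_max?_ge {l : List Int} {j k : Nat} (hjk : j < k) (hk : k < l.length) :
    l.getD k 0 ≤ ((l.drop (j + 1)).max?).getD 0 := by
  have hmem : l.getD k 0 ∈ l.drop (j + 1) := by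
    rw [List.getD_eq_getElem l 0 hk]
    exact List.mem_iff_getElem.mpr ⟨k - (j + 1), by simp [List.length_drop]; omega,
      by rw [List.getElem_drop]; congr 1; omega⟩
  cases hmax : (l.drop (j + 1)).max? with
  | none => exact absurd (List.max?_eq_none_iff.mp hmax ▸ hmem) (List.not_mem_nil)
  | some m => exact (List.max?_eq_some_iff.mp hmax).2 _ hmem

-- abbreviations for the sorted corner products, in `getD` form
def sortedOf (l : List Int) : List Int := PySem.List.sorted l (fun x => x) false

def cornerMin (l : List Int) : Int :=
  min ((sortedOf l).getD 0 0 * (sortedOf l).getD 1 0 * (sortedOf l).getD 2 0)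
      ((sortedOf l).getD 0 0 * (sortedOf l).getD ((sortedOf l).length - 2) 0 *
        (sortedOf l).getD ((sortedOf l).length - 1) 0)

-- every A-side candidate dominates cornerMin
theorem cornerMin_le_cand (l : List Int) (h : 3 ≤ l.length) {j : Nat}
    (hj1 : 1 ≤ j) (hj2 : j + 1 < l.length) :
    cornerMin l ≤ cand l j := by
  have hperm : l.Perm (sortedOf l) := (PySem.List.sorted_perm l (fun x => x) false).symm
  have hpw : (sortedOf l).Pairwise (· ≤ ·) := by
    simpa using PySem.List.sorted_pairwise l (fun x => x)
  have hslen : 3 ≤ (sortedOf l).length := by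
    rw [hperm.length_eq] at h; exact h
  have hlow : ∀ v : Int, TripS l v → cornerMin l ≤ v := fun v hv =>
    low_sorted hpw hslen (tripS_of_perm hperm hv)
  obtain ⟨i1, hi1, he1⟩ := take_min?_index (l := l) hj1 (by omega)
  obtain ⟨i2, hi2, he2⟩ := take_max?_index (l := l) hj1 (by omega)
  obtain ⟨k1, hk1, hk1l, he3⟩ := drop_min?_index hj2
  obtain ⟨k2, hk2, hk2l, he4⟩ := drop_max?_index hj2
  simp only [cand]
  refine le_min (le_min (le_min ?_ ?_) ?_) ?_
  · rw [he1, he3]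
    exact (hlow _ (tripS_of_indices hi1 hk1 hk1l)).trans_eq (by ring)
  · rw [he1, he4]
    exact (hlow _ (tripS_of_indices hi1 hk2 hk2l)).trans_eq (by ring)
  · rw [he2, he3]
    exact (hlow _ (tripS_of_indices hi2 hk1 hk1l)).trans_eq (by ring)
  · rw [he2, he4]
    exact (hlow _ (tripS_of_indices hi2 hk2 hk2l)).trans_eq (by ring)

-- cornerMin is reached by the candidate at the middle index of its realizing triple
theorem cand_le_cornerMin (l : List Int) (h : 3 ≤ l.length) :
    ∃ j : Nat, 1 ≤ j ∧ j + 1 < l.length ∧ cand l j ≤ cornerMin l := by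
  have hperm : l.Perm (sortedOf l) := (PySem.List.sorted_perm l (fun x => x) false).symm
  have hslen : 3 ≤ (sortedOf l).length := by
    rw [hperm.length_eq] at h; exact h
  have htrip : TripS l (cornerMin l) := by
    unfold cornerMin
    rcases min_choice ((sortedOf l).getD 0 0 * (sortedOf l).getD 1 0 * (sortedOf l).getD 2 0)
      ((sortedOf l).getD 0 0 * (sortedOf l).getD ((sortedOf l).length - 2) 0 *
        (sortedOf l).getD ((sortedOf l).length - 1) 0) with hmc | hmc <;> rw [hmc]
    · exact tripS_of_perm hperm.symm (achieve_c1 hslen)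
    · exact tripS_of_perm hperm.symm (achieve_c2 hslen)
  obtain ⟨i, j, k, hij, hjk, hk, hval⟩ := tripS_indices htrip
  refine ⟨j, by omega, by omega, ?_⟩
  rw [hval]
  simp only [cand]
  exact corner_min_le (take_min?_le hij (by omega)) (take_max?_ge hij (by omega))
    (drop_min?_le hjk hk) (drop_max?_ge hjk hk)

theorem candList_min? (l : List Int) (h : 3 ≤ l.length) :
    (candList l).min? = some (cornerMin l) := by
  obtain ⟨j, hj1, hj2, hle⟩ := cand_le_cornerMin l h
  have hmemj : cand l j ∈ candList l := by
    unfold candList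
    exact List.mem_map.mpr ⟨j - 1, List.mem_range.mpr (by omega),
      by congr 1; omega⟩
  have hbound : ∀ b ∈ candList l, cornerMin l ≤ b := by
    intro b hb
    obtain ⟨k, hk, rfl⟩ := List.mem_map.mp hb
    have hk' := List.mem_range.mp hk
    exact cornerMin_le_cand l h (by omega) (by omega)
  have heq : cand l j = cornerMin l := le_antisymm hle (hbound _ hmemj)
  exact List.min?_eq_some_iff.mpr ⟨heq ▸ hmemj, hbound⟩

-- port B computes cornerMin
theorem portB_eq_cornerMin (l : List Int) (h : 3 ≤ l.length) :
    min_iloczyn_v2_alt l = cornerMin l := by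
  have hlen : ¬ ((l.length : Int) ≤ 2) := by omega
  have hslen : (sortedOf l).length = l.length :=
    (PySem.List.sorted_perm l (fun x => x) false).length_eq
  unfold min_iloczyn_v2_alt
  simp only [if_neg hlen]
  unfold cornerMin
  have h3 : 3 ≤ (sortedOf l).length := by omega
  rw [show PySem.List.sorted l (fun x => x) false = sortedOf l from rfl]
  rw [PySem.List.pyGetD_zero,
      PySem.List.pyGetD_eq_getElem _ 0 (by omega) (by omega),
      PySem.List.pyGetD_eq_getElem _ 0 (by omega) (by omega),
      PySem.List.pyGetD_neg_ofNat _ 1 0 (by omega) (by omega),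
      PySem.List.pyGetD_neg_ofNat _ 2 0 (by omega) (by omega)]
  rw [List.getD_eq_getElem _ 0 (by omega), List.getD_eq_getElem _ 0 (by omega),
      List.getD_eq_getElem _ 0 (by omega), List.getD_eq_getElem _ 0 (by omega),
      List.getD_eq_getElem _ 0 (by omega)]
  norm_num
  congr 1
  rw [mul_right_comm]

-- ===== VERDICT (by name: the statement is the Claim_ definition above) =====
theorem min_iloczyn_v2_spec : Claim_equal_min_iloczyn_v2 := by
  intro l _ hpre
  have h : 3 ≤ l.length := hpre
  unfold Spec_min_iloczyn_v2
  rw [portA_eq_candList l h, candList_min? l h, portB_eq_cornerMin l h]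
  rfl
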